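-- pv_equiv track=rewrite | github.com/LordBedford/Intro-to-AI-Group-Project | MapListGenorator.py | mapHelper
-- ===== SOURCE A (Python) =====
-- def mapHelper(x1,y1,x2,y2,array):
--     ret = []
--     for i in range(len(array)):
--         temp = []
--         for j in range(len(array[i])):
--             if((i == x1) and (j == y1)):
--                 temp.append("5")
--             elif((i == x2) and (j == y2)):
--                 temp.append("6")
--             else:
--                 temp.append(array[i][j])
--         ret.append(temp)
--     return ret
-- ===== SOURCE B (Python) =====
-- def mapHelper(x1, y1, x2, y2, array):
--     # copy every row, then make the two marks directly ("6" first so "5"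
--     # wins when both coordinates coincide, like A's elif)
--     ret = [row[:] for row in array]
--     if 0 <= x2 < len(ret) and 0 <= y2 < len(ret[x2]):
--         ret[x2][y2] = "6"
--     if 0 <= x1 < len(ret) and 0 <= y1 < len(ret[x1]):
--         ret[x1][y1] = "5"
--     return ret
-- ===== Notes on version B (the rewrite author's own statement) =====
-- stated objective: simpler
-- what changed: Replaces the per-cell if/elif rebuild with a plain row copy followed by two guarded single-cell writes ('6' before '5' so '5' wins on a coinciding cell).
import Mathlib
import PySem

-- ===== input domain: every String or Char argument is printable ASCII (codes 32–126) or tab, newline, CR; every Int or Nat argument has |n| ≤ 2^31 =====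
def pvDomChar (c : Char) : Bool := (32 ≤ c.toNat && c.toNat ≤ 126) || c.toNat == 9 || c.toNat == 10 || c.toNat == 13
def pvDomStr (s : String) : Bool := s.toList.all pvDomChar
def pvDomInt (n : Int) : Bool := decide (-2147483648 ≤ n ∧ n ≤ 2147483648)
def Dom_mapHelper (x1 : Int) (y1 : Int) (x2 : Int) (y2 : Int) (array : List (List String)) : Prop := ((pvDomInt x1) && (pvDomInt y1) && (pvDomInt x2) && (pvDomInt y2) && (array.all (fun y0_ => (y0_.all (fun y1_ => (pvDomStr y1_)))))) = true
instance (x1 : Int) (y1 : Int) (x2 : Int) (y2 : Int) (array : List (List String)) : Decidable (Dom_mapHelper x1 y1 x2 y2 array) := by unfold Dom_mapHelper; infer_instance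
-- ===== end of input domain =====

-- B replaces A's per-cell branching rebuild by a row copy plus two guarded
-- in-place marks ("6" written before "5" so "5" wins on a coinciding cell).

-- ===== PORT A =====
-- A: for i in range(len(array)): build temp cell by cell with the if/elif, append to ret.
def mapHelper (x1 : Int) (y1 : Int) (x2 : Int) (y2 : Int) (array : List (List String)) : List (List String) :=
  (List.range array.length).foldl (fun ret i =>
    let rowi := array.getD i []
    let temp := (List.range rowi.length).foldl (fun temp j =>
      if ((Int.ofNat i) == x1) && ((Int.ofNat j) == y1) then temp ++ ["5"]
      else if ((Int.ofNat i) == x2) && ((Int.ofNat j) == y2) then temp ++ ["6"]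
      else temp ++ [rowi.getD j ""]) []
    ret ++ [temp]) []

-- ===== PORT B =====
-- guarded single-cell write: ret[x][y] = v when (x, y) is in range, else no-op
def setCellB (g : List (List String)) (x y : Int) (v : String) : List (List String) :=
  if 0 ≤ x ∧ x < (g.length : Int) ∧ 0 ≤ y ∧ y < ((g.getD x.toNat []).length : Int) then
    g.set x.toNat ((g.getD x.toNat []).set y.toNat v)
  else g

def mapHelper_alt (x1 : Int) (y1 : Int) (x2 : Int) (y2 : Int) (array : List (List String)) : List (List String) :=
  let ret := array.map (fun row => row.map id)  -- [row[:] for row in array]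
  setCellB (setCellB ret x2 y2 "6") x1 y1 "5"

-- ===== PRECONDITION & SPEC =====
def Spec_mapHelper (x1 : Int) (y1 : Int) (x2 : Int) (y2 : Int) (array : List (List String)) (out : List (List String)) : Prop := out = mapHelper_alt x1 y1 x2 y2 array
instance (x1 : Int) (y1 : Int) (x2 : Int) (y2 : Int) (array : List (List String)) (out : List (List String)) : Decidable (Spec_mapHelper x1 y1 x2 y2 array out) := by unfold Spec_mapHelper; infer_instance

-- ===== CLAIM (what is proved, stated in full; the proofs are below) =====
def Claim_equal_mapHelper : Prop := ∀ (x1 : Int) (y1 : Int) (x2 : Int) (y2 : Int) (array : List (List String)), Dom_mapHelper x1 y1 x2 y2 array → Spec_mapHelper x1 y1 x2 y2 array (mapHelper x1 y1 x2 y2 array)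

-- ===== LEMMAS AND PROOFS =====

theorem pv_foldl_append {α β : Type} (f : α → β) :
    ∀ (xs : List α) (init : List β),
      xs.foldl (fun acc i => acc ++ [f i]) init = init ++ xs.map f := by
  intro xs
  induction xs with
  | nil => simp
  | cons a t ih => intro init; simp [List.foldl, ih]

theorem pv_mapHelper_eq (x1 y1 x2 y2 : Int) (array : List (List String)) :
    mapHelper x1 y1 x2 y2 array =
      (List.range array.length).map (fun i =>
        (List.range (array.getD i []).length).map (fun j =>
          if ((Int.ofNat i) == x1) && ((Int.ofNat j) == y1) then "5"
          else if ((Int.ofNat i) == x2) && ((Int.ofNat j) == y2) then "6"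
          else (array.getD i []).getD j "")) := by
  unfold mapHelper
  rw [show (fun (ret : List (List String)) i =>
        ret ++ [(List.range (array.getD i []).length).foldl (fun temp j =>
          if ((Int.ofNat i) == x1) && ((Int.ofNat j) == y1) then temp ++ ["5"]
          else if ((Int.ofNat i) == x2) && ((Int.ofNat j) == y2) then temp ++ ["6"]
          else temp ++ [(array.getD i []).getD j ""]) []]) =
      (fun ret i => ret ++ [(fun i =>
        (List.range (array.getD i []).length).map (fun j =>
          if ((Int.ofNat i) == x1) && ((Int.ofNat j) == y1) then "5"
          else if ((Int.ofNat i) == x2) && ((Int.ofNat j) == y2) then "6"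
          else (array.getD i []).getD j "")) i]) from ?_]
  · rw [pv_foldl_append]; simp
  · funext ret i
    congr 1
    rw [show (fun (temp : List String) j =>
          if ((Int.ofNat i) == x1) && ((Int.ofNat j) == y1) then temp ++ ["5"]
          else if ((Int.ofNat i) == x2) && ((Int.ofNat j) == y2) then temp ++ ["6"]
          else temp ++ [(array.getD i []).getD j ""]) =
        (fun temp j => temp ++ [(fun j =>
          if ((Int.ofNat i) == x1) && ((Int.ofNat j) == y1) then "5"
          else if ((Int.ofNat i) == x2) && ((Int.ofNat j) == y2) then "6"
          else (array.getD i []).getD j "") j]) from ?_]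
    · rw [pv_foldl_append]; simp
    · funext temp j
      simp only [Bool.and_eq_true, beq_iff_eq]
      by_cases h1 : (Int.ofNat i) = x1 ∧ (Int.ofNat j) = y1
      · rw [if_pos h1, if_pos h1]
      · rw [if_neg h1, if_neg h1]
        by_cases h2 : (Int.ofNat i) = x2 ∧ (Int.ofNat j) = y2
        · rw [if_pos h2, if_pos h2]
        · rw [if_neg h2, if_neg h2]

theorem pv_setCellB_length (g : List (List String)) (x y : Int) (v : String) :
    (setCellB g x y v).length = g.length := by
  unfold setCellB; split_ifs <;> simp

theorem pv_setCellB_get (g : List (List String)) (x y : Int) (v : String)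
    (i : Nat) (hi : i < g.length) :
    (setCellB g x y v)[i]'(by rw [pv_setCellB_length]; exact hi) =
      if x = (i : Int) ∧ 0 ≤ y ∧ y < (g[i].length : Int)
      then g[i].set y.toNat v else g[i] := by
  unfold setCellB
  by_cases hin : 0 ≤ x ∧ x < (g.length : Int) ∧ 0 ≤ y ∧ y < ((g.getD x.toNat []).length : Int)
  · simp only [if_pos hin]
    obtain ⟨hx0, hxl, hy0, hyl⟩ := hin
    have hxg : x.toNat < g.length := by omega
    rw [List.getD_eq_getElem _ _ hxg] at hyl
    rw [List.getElem_set]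
    by_cases hxi : x.toNat = i
    · subst hxi
      rw [if_pos rfl, if_pos ⟨by omega, hy0, hyl⟩, List.getD_eq_getElem _ _ hxg]
    · rw [if_neg hxi]
      by_cases hc : x = (i : Int) ∧ 0 ≤ y ∧ y < (g[i].length : Int)
      · obtain ⟨hc1, -⟩ := hc
        exact absurd (by omega) hxi
      · rw [if_neg hc]
  · simp only [if_neg hin]
    by_cases hc : x = (i : Int) ∧ 0 ≤ y ∧ y < (g[i].length : Int)
    · exfalso
      obtain ⟨hx, hy0, hyl⟩ := hc
      apply hin
      refine ⟨by omega, by omega, hy0, ?_⟩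
      rw [List.getD_eq_getElem _ _ (by omega : x.toNat < g.length)]
      have he : x.toNat = i := by omega
      simpa [he] using hyl
    · rw [if_neg hc]

-- ===== VERDICT (by name: the statement is the Claim_ definition above) =====
theorem mapHelper_spec : Claim_equal_mapHelper := by
  intro x1 y1 x2 y2 array _
  unfold Spec_mapHelper
  rw [pv_mapHelper_eq]
  unfold mapHelper_alt
  have hcopy : array.map (fun row => row.map id) = array := by simp
  rw [hcopy]
  apply List.ext_getElem
  · simp [pv_setCellB_length]
  · intro i hiL hiR
    have hi : i < array.length := by
      simpa [pv_setCellB_length] using hiR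
    rw [pv_setCellB_get _ _ _ _ i (by simpa [pv_setCellB_length] using hi)]
    rw [pv_setCellB_get _ _ _ _ i hi]
    simp only [List.getElem_map, List.getElem_range]
    have hgi : array.getD i [] = array[i] := List.getD_eq_getElem _ _ hi
    rw [hgi]
    rw [show ((if x2 = (i : Int) ∧ 0 ≤ y2 ∧ y2 < (array[i].length : Int)
            then array[i].set y2.toNat "6" else array[i]).length : Int)
        = (array[i].length : Int) by split_ifs <;> simp]
    by_cases h5 : x1 = (i : Int) ∧ 0 ≤ y1 ∧ y1 < (array[i].length : Int) <;>
      by_cases h6 : x2 = (i : Int) ∧ 0 ≤ y2 ∧ y2 < (array[i].length : Int)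
    · rw [if_pos h5, if_pos h6]
      apply List.ext_getElem
      · simp
      · intro j hjL hjR
        simp only [List.getElem_map, List.getElem_range]
        have hj : j < array[i].length := by revert hjL; simp
        rw [List.getD_eq_getElem _ _ hj]
        simp only [List.getElem_set]
        obtain ⟨h5a, h5b, h5c⟩ := h5
        obtain ⟨h6a, h6b, h6c⟩ := h6
        simp only [Bool.and_eq_true, beq_iff_eq, Int.ofNat_eq_natCast]
        split_ifs <;> first | rfl | (exfalso; omega)
    · rw [if_pos h5, if_neg h6]
      apply List.ext_getElem
      · simp
      · intro j hjL hjR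
        simp only [List.getElem_map, List.getElem_range]
        have hj : j < array[i].length := by revert hjL; simp
        rw [List.getD_eq_getElem _ _ hj]
        simp only [List.getElem_set]
        obtain ⟨h5a, h5b, h5c⟩ := h5
        simp only [Bool.and_eq_true, beq_iff_eq, Int.ofNat_eq_natCast]
        split_ifs <;> first | rfl | (exfalso; omega)
    · rw [if_neg h5, if_pos h6]
      apply List.ext_getElem
      · simp
      · intro j hjL hjR
        simp only [List.getElem_map, List.getElem_range]
        have hj : j < array[i].length := by revert hjL; simp
        rw [List.getD_eq_getElem _ _ hj]
        simp only [List.getElem_set]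
        obtain ⟨h6a, h6b, h6c⟩ := h6
        simp only [Bool.and_eq_true, beq_iff_eq, Int.ofNat_eq_natCast]
        split_ifs <;> first | rfl | (exfalso; omega)
    · rw [if_neg h5, if_neg h6]
      apply List.ext_getElem
      · simp
      · intro j hjL hjR
        simp only [List.getElem_map, List.getElem_range]
        have hj : j < array[i].length := by revert hjL; simp
        rw [List.getD_eq_getElem _ _ hj]
        simp only [Bool.and_eq_true, beq_iff_eq, Int.ofNat_eq_natCast]
        split_ifs <;> first | rfl | (exfalso; omega)
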